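-- pv_equiv track=rewrite | github.com/quirk-finder/texgrep | backend/search/snippets.py | _find_math_delimiter
-- ===== SOURCE A (Python) =====
-- def _find_math_delimiter(text: str, start: int, opening: str, closing: str) -> int | None:
--     pos = start + len(opening)
--     while True:
--         idx = text.find(closing, pos)
--         if idx == -1:
--             return None
--         if not _is_escaped(text, idx):
--             return idx + len(closing)
--         pos = idx + len(closing)
--
-- def _is_escaped(text: str, index: int) -> bool:
--     backslashes = 0
--     i = index - 1
--     while i >= 0 and text[i] == "\\":
--         backslashes += 1
--         i -= 1
--     return backslashes % 2 == 1
-- ===== SOURCE B (Python) =====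
-- def _find_math_delimiter(text: str, start: int, opening: str, closing: str) -> int | None:
--     # Precompute, in one pass, whether each position is preceded by an odd run of
--     # backslashes, then scan forward for the first unescaped occurrence of closing.
--     n, m = len(text), len(closing)
--     escaped = [False] * (n + 1)
--     run = 0
--     for j, ch in enumerate(text):
--         escaped[j] = run % 2 == 1
--         run = run + 1 if ch == "\\" else 0
--     escaped[n] = run % 2 == 1
--     i = max(start + len(opening), 0)
--     while i + m <= n:
--         if text[i:i + m] == closing:
--             if not escaped[i]:
--                 return i + m
--             i += m
--         else:
--             i += 1
--     return None
-- ===== Notes on version B (the rewrite author's own statement) =====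
-- stated objective: alternative
-- what changed: A repeatedly calls find() and rescans backwards for escaping backslashes at each candidate; B precomputes an escaped-position parity table in one pass and does a single forward scan over it. Pre_ excludes scan-start positions in (-len(text), 0) (outside the natural domain of a delimiter search; A inherits str.find's from-the-end reinterpretation there, B scans from 0) and the empty-closing inputs on which A loops forever.
-- outside the precondition, e.g. on _find_math_delimiter(')a)', -2, '', ')'): A returns 3, B returns 1
import Mathlib
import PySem

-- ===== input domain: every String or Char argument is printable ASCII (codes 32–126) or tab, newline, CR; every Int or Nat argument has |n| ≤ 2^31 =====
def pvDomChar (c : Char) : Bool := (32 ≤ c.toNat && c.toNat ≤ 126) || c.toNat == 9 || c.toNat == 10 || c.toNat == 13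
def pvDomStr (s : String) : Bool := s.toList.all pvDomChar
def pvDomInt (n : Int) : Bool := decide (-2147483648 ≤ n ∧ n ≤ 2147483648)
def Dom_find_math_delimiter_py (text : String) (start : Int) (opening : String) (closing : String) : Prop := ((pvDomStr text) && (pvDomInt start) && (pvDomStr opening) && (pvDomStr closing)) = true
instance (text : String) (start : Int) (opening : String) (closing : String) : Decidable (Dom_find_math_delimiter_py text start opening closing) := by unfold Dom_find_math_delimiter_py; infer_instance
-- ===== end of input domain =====

-- B replaces A's repeated find() + backward escape rescans with a one-pass escaped-position
-- parity table and a single forward scan (objective: alternative decomposition, same result).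

-- ===== PORT A =====
-- _is_escaped's backward while loop: number of consecutive backslashes ending just before index i
def pvEscCount (cs : List Char) : Nat → Nat
  | 0 => 0
  | j+1 => if cs[j]? = some '\\' then pvEscCount cs j + 1 else 0

-- Python's text.find(closing, pos) for a non-negative start position
def pvFindFrom (cs c : List Char) (i : Nat) : Option Nat :=
  if i ≤ cs.length then
    if (cs.drop i).take c.length = c then some i else pvFindFrom cs c (i+1)
  else none
termination_by cs.length + 1 - i
decreasing_by omega

-- A's while-True loop (fuel only makes the recursion total; exhausted exactly where Python A diverges)
def pvALoop (cs c : List Char) : Nat → Nat → Option Int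
  | 0, _ => none
  | f+1, pos =>
    match pvFindFrom cs c pos with
    | none => none
    | some idx =>
      if pvEscCount cs idx % 2 = 1 then pvALoop cs c f (idx + c.length)
      else some ((idx + c.length : Nat) : Int)

def find_math_delimiter_py (text : String) (start : Int) (opening : String) (closing : String) : Option Int :=
  let cs := text.toList
  let c := closing.toList
  let pos : Int := start + (opening.toList.length : Int)
  -- str.find clamps a negative start to max(0, len + start)
  let p : Nat := if pos < 0 then (cs.length + pos).toNat else pos.toNat
  pvALoop cs c (cs.length + 2) p

-- ===== PORT B =====
-- B's for loop: escaped[] table (parity of the backslash run ending before each position) plus final run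
def pvBEscTable (cs : List Char) : List Bool :=
  let st := cs.foldl
    (fun (p : List Bool × Nat) ch => (p.1 ++ [decide (p.2 % 2 = 1)], if ch = '\\' then p.2 + 1 else 0))
    ([], 0)
  st.1 ++ [decide (st.2 % 2 = 1)]

-- B's while loop: forward scan over the table (fuel only for totality; exhausted exactly where Python B diverges)
def pvBLoop (cs c : List Char) (esc : List Bool) : Nat → Nat → Option Int
  | 0, _ => none
  | f+1, i =>
    if i + c.length ≤ cs.length then
      if (cs.drop i).take c.length = c then
        if esc.getD i false = false then some ((i + c.length : Nat) : Int)
        else pvBLoop cs c esc f (i + c.length)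
      else pvBLoop cs c esc f (i+1)
    else none

def find_math_delimiter_py_alt (text : String) (start : Int) (opening : String) (closing : String) : Option Int :=
  let cs := text.toList
  let c := closing.toList
  let esc := pvBEscTable cs
  let i : Nat := (max (start + (opening.toList.length : Int)) 0).toNat
  pvBLoop cs c esc (cs.length + 2) i

-- ===== PRECONDITION & SPEC =====
-- backslash run ending just before the scan start position, used only by Pre_
def pvPreRun (text : String) (start : Int) (opening : String) : Nat :=
  let cs := text.toList
  let p : Nat := (max (start + (opening.toList.length : Int)) 0).toNat
  ((cs.take p).reverse.takeWhile (fun ch => ch = '\\')).length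

-- Pre_ excludes (a) scan-start positions with -len(text) < start+len(opening) < 0 — outside
-- the natural domain of the search (the caller passes a real match position); there A inherits
-- str.find's from-the-end reinterpretation of a negative start while B scans from 0 — and
-- (b) an empty closing whose in-range start position is preceded by an odd backslash run,
-- where Python A (and B) loop forever.
def Pre_find_math_delimiter_py (text : String) (start : Int) (opening : String) (closing : String) : Prop :=
  (0 ≤ start + (opening.toList.length : Int) ∨
    start + (opening.toList.length : Int) + (text.toList.length : Int) ≤ 0) ∧
  (closing ≠ "" ∨ (text.toList.length : Int) < start + (opening.toList.length : Int) ∨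
    pvPreRun text start opening % 2 = 0)
instance (text : String) (start : Int) (opening : String) (closing : String) : Decidable (Pre_find_math_delimiter_py text start opening closing) := by unfold Pre_find_math_delimiter_py; infer_instance
def pvWitness_find_math_delimiter_py : String × Int × String × String := ("a\\)b)", 0, "(", ")")

def Spec_find_math_delimiter_py (text : String) (start : Int) (opening : String) (closing : String) (out : Option Int) : Prop := out = find_math_delimiter_py_alt text start opening closing
instance (text : String) (start : Int) (opening : String) (closing : String) (out : Option Int) : Decidable (Spec_find_math_delimiter_py text start opening closing out) := by unfold Spec_find_math_delimiter_py; infer_instance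

-- ===== CLAIM =====
def Claim_equal_find_math_delimiter_py : Prop := ∀ (text : String) (start : Int) (opening : String) (closing : String), Dom_find_math_delimiter_py text start opening closing → Pre_find_math_delimiter_py text start opening closing → Spec_find_math_delimiter_py text start opening closing (find_math_delimiter_py text start opening closing)

-- ===== LEMMAS AND PROOFS =====

-- structural run value: pvF cs s i = backslash run ending just before position i, seeded with s
def pvF : List Char → Nat → Nat → Nat
  | _, s, 0 => s
  | [], s, _+1 => s
  | ch :: t, s, i+1 => pvF t (if ch = '\\' then s + 1 else 0) i

def pvFlags : List Char → Nat → List Bool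
  | [], _ => []
  | ch :: t, s => decide (s % 2 = 1) :: pvFlags t (if ch = '\\' then s + 1 else 0)

def pvRunEnd : List Char → Nat → Nat
  | [], s => s
  | ch :: t, s => pvRunEnd t (if ch = '\\' then s + 1 else 0)

theorem pvFold_char (cs : List Char) : ∀ (acc : List Bool) (s : Nat),
    cs.foldl (fun (p : List Bool × Nat) ch =>
        (p.1 ++ [decide (p.2 % 2 = 1)], if ch = '\\' then p.2 + 1 else 0)) (acc, s)
      = (acc ++ pvFlags cs s, pvRunEnd cs s) := by
  induction cs with
  | nil => intro acc s; simp [pvFlags, pvRunEnd]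
  | cons ch t ih => intro acc s; simp [List.foldl, pvFlags, pvRunEnd, ih]

theorem pvFlags_getD (cs : List Char) : ∀ (s : Nat) (i : Nat), i ≤ cs.length →
    (pvFlags cs s ++ [decide (pvRunEnd cs s % 2 = 1)]).getD i false = decide (pvF cs s i % 2 = 1) := by
  induction cs with
  | nil =>
    intro s i hi
    have h0 : i = 0 := by simpa using hi
    subst h0
    simp [pvFlags, pvRunEnd, pvF]
  | cons ch t ih =>
    intro s i hi
    cases i with
    | zero => simp [pvFlags, pvF]
    | succ j =>
      simp only [pvFlags, pvRunEnd, pvF, List.cons_append, List.getD_cons_succ]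
      exact ih _ j (by simpa using hi)

theorem pvF_succ (cs : List Char) : ∀ (s j : Nat), j < cs.length →
    pvF cs s (j+1) = if cs[j]? = some '\\' then pvF cs s j + 1 else 0 := by
  induction cs with
  | nil => intro s j hj; simp at hj
  | cons ch t ih =>
    intro s j hj
    cases j with
    | zero =>
      simp only [pvF, List.getElem?_cons_zero]
      by_cases hb : ch = '\\' <;> simp [hb]
    | succ j' =>
      simp only [pvF, List.getElem?_cons_succ]
      exact ih _ j' (by simpa using hj)

theorem pvF_eq_esc (cs : List Char) : ∀ i, i ≤ cs.length → pvF cs 0 i = pvEscCount cs i := by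
  intro i
  induction i with
  | zero =>
    intro _
    cases cs <;> rfl
  | succ j ih =>
    intro hj
    rw [pvF_succ cs 0 j (by omega), pvEscCount, ih (by omega)]

theorem pvTable_getD (cs : List Char) (i : Nat) (hi : i ≤ cs.length) :
    (pvBEscTable cs).getD i false = decide (pvEscCount cs i % 2 = 1) := by
  unfold pvBEscTable
  rw [pvFold_char cs [] 0]
  simpa [pvF_eq_esc cs i hi] using pvFlags_getD cs 0 i hi

theorem pvFindFrom_none (cs c : List Char) (_hc : c ≠ []) :
    ∀ k i, cs.length + 1 - i ≤ k → cs.length < i + c.length → pvFindFrom cs c i = none := by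
  intro k
  induction k with
  | zero =>
    intro i hk _
    rw [pvFindFrom]
    have : ¬ i ≤ cs.length := by omega
    simp [this]
  | succ k ih =>
    intro i hk hlen
    rw [pvFindFrom]
    by_cases hi : i ≤ cs.length
    · have hne : (cs.drop i).take c.length ≠ c := by
        intro h
        have := congrArg List.length h
        simp at this
        omega
      simp [hi, hne]
      exact ih (i+1) (by omega) (by omega)
    · simp [hi]

theorem pvFindFrom_step (cs c : List Char) (i : Nat)
    (h : (cs.drop i).take c.length ≠ c) : pvFindFrom cs c i = pvFindFrom cs c (i+1) := by
  rw [pvFindFrom]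
  by_cases hi : i ≤ cs.length
  · simp [hi, h]
  · rw [pvFindFrom]
    have h1 : ¬ i + 1 ≤ cs.length := by omega
    simp [hi, h1]

theorem pvFindFrom_match (cs c : List Char) (i : Nat) (hi : i ≤ cs.length)
    (h : (cs.drop i).take c.length = c) : pvFindFrom cs c i = some i := by
  rw [pvFindFrom]; simp [hi, h]

theorem pvFindFrom_nil (cs : List Char) (p : Nat) :
    pvFindFrom cs [] p = if p ≤ cs.length then some p else none := by
  rw [pvFindFrom]
  by_cases h : p ≤ cs.length <;> simp [h]

-- main loop equality for a non-empty closing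
theorem pvMain (cs c : List Char) (hc : c ≠ []) :
    ∀ k i fa fb, cs.length + 2 - i ≤ k → k ≤ fb → cs.length + 2 - i ≤ fa →
      pvBLoop cs c (pvBEscTable cs) fb i = pvALoop cs c fa i := by
  have hm : 0 < c.length := List.length_pos_of_ne_nil hc
  intro k
  induction k with
  | zero =>
    intro i fa fb hk _ _
    have hi : cs.length + 2 ≤ i := by omega
    have hcond : ¬ (i + c.length ≤ cs.length) := by omega
    have hb : pvBLoop cs c (pvBEscTable cs) fb i = none := by
      cases fb with
      | zero => rfl
      | succ f => simp [pvBLoop, hcond]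
    have hfind := pvFindFrom_none cs c hc (cs.length + 1) i (by omega) (by omega)
    have ha : pvALoop cs c fa i = none := by
      cases fa with
      | zero => rfl
      | succ f => simp [pvALoop, hfind]
    rw [hb, ha]
  | succ k ih =>
    intro i fa fb hk hfb hfa
    by_cases hcond : i + c.length ≤ cs.length
    · have hi : i ≤ cs.length := by omega
      obtain ⟨fa', rfl⟩ : ∃ fa', fa = fa' + 1 := ⟨fa - 1, by omega⟩
      obtain ⟨fb', rfl⟩ : ∃ fb', fb = fb' + 1 := ⟨fb - 1, by omega⟩
      by_cases hmatch : (cs.drop i).take c.length = c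
      · have hfind := pvFindFrom_match cs c i hi hmatch
        have htab := pvTable_getD cs i hi
        by_cases hpar : pvEscCount cs i % 2 = 1
        · have htab' : (pvBEscTable cs).getD i false = true := by rw [htab]; simp [hpar]
          have hB : pvBLoop cs c (pvBEscTable cs) (fb' + 1) i =
              pvBLoop cs c (pvBEscTable cs) fb' (i + c.length) := by
            simp [pvBLoop, hcond, hmatch, List.getD_eq_getElem?_getD ▸ htab']
          have hA : pvALoop cs c (fa' + 1) i = pvALoop cs c fa' (i + c.length) := by
            simp [pvALoop, hfind, hpar]
          rw [hB, hA]
          exact ih (i + c.length) fa' fb' (by omega) (by omega) (by omega)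
        · have htab' : (pvBEscTable cs).getD i false = false := by rw [htab]; simp [hpar]
          simp [pvBLoop, pvALoop, hcond, hmatch, hfind, List.getD_eq_getElem?_getD ▸ htab', hpar]
      · have hstep := pvFindFrom_step cs c i hmatch
        have hA : pvALoop cs c (fa' + 1) i = pvALoop cs c (fa' + 1) (i + 1) := by
          conv_rhs => rw [pvALoop]
          rw [pvALoop, ← hstep]
        rw [hA]
        have hB : pvBLoop cs c (pvBEscTable cs) (fb' + 1) i =
            pvBLoop cs c (pvBEscTable cs) fb' (i+1) := by
          simp [pvBLoop, hcond, hmatch]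
        rw [hB]
        exact ih (i+1) (fa' + 1) fb' (by omega) (by omega) (by omega)
    · have hb : pvBLoop cs c (pvBEscTable cs) fb i = none := by
        cases fb with
        | zero => rfl
        | succ f => simp [pvBLoop, hcond]
      have hfind := pvFindFrom_none cs c hc (cs.length + 1) i (by omega) (by omega)
      have ha : pvALoop cs c fa i = none := by
        cases fa with
        | zero => rfl
        | succ f => simp [pvALoop, hfind]
      rw [hb, ha]

-- empty closing: the two loops step identically (both fuel out where Python diverges)
theorem pvNil (cs : List Char) : ∀ f i,
    pvBLoop cs [] (pvBEscTable cs) f i = pvALoop cs [] f i := by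
  intro f
  induction f with
  | zero => intro i; rfl
  | succ f ih =>
    intro i
    by_cases hi : i ≤ cs.length
    · have htab := pvTable_getD cs i hi
      by_cases hpar : pvEscCount cs i % 2 = 1
      · have htab' : (pvBEscTable cs).getD i false = true := by rw [htab]; simp [hpar]
        simp [pvBLoop, pvALoop, pvFindFrom_nil, hi, hpar, List.getD_eq_getElem?_getD ▸ htab', ih i]
      · have htab' : (pvBEscTable cs).getD i false = false := by rw [htab]; simp [hpar]
        simp [pvBLoop, pvALoop, pvFindFrom_nil, hi, hpar, List.getD_eq_getElem?_getD ▸ htab']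
    · simp [pvBLoop, pvALoop, pvFindFrom_nil, hi]

-- ===== VERDICT =====
theorem find_math_delimiter_py_spec : Claim_equal_find_math_delimiter_py := by
  intro text start opening closing _ hpre
  obtain ⟨hpos, _⟩ := hpre
  unfold Spec_find_math_delimiter_py find_math_delimiter_py find_math_delimiter_py_alt
  dsimp only
  have hpp : (if start + (opening.toList.length : Int) < 0 then
        ((text.toList.length : Int) + (start + (opening.toList.length : Int))).toNat
      else (start + (opening.toList.length : Int)).toNat)
      = (max (start + (opening.toList.length : Int)) 0).toNat := by
    rcases hpos with h | h <;> split_ifs with h2 <;> omega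
  rw [hpp]
  by_cases hcl : closing.toList = []
  · rw [hcl]
    exact (pvNil text.toList _ _).symm
  · exact (pvMain text.toList closing.toList hcl (text.toList.length + 2)
      ((max (start + (opening.toList.length : Int)) 0).toNat) (text.toList.length + 2)
      (text.toList.length + 2) (by omega) (by omega) (by omega)).symm
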